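-- pv_equiv track=rewrite | github.com/imguozr/LC-Solutions | 1306_Jump_Game_III.py | canReach_2
-- ===== SOURCE A (Python) =====
-- from typing import List
--
-- def canReach_2(arr: List[int], start: int) -> bool:
--     """
--         Iteratively
--     """
--
--     from collections import deque
--     queue, seen = deque([start]), {start}
--     while queue:
--         curr = queue.popleft()
--         if not arr[curr]:
--             return True
--         for nxt in [curr + arr[curr], curr - arr[curr]]:
--             if 0 <= nxt < len(arr) and nxt not in seen:
--                 seen.add(nxt)
--                 queue.append(nxt)
--     return False
-- ===== SOURCE B (Python) =====
-- def canReach_2(arr, start):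
--     n = len(arr)
--     reach = {start}
--     frontier = {start}
--     while frontier:
--         new = set()
--         for i in frontier:
--             v = arr[i]
--             for j in (i + v, i - v):
--                 if 0 <= j < n and j not in reach:
--                     new.add(j)
--         reach |= new
--         frontier = new
--     return any(arr[i] == 0 for i in reach)
-- ===== Notes on version B (the rewrite author's own statement) =====
-- stated objective: alternative
-- what changed: Replaced the deque-based BFS (pop one node per iteration, shared seen set) by a level-by-level frontier-saturation of the reachable-index set followed by a single any(arr[i]==0) check over the saturated set.
import Mathlib
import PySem

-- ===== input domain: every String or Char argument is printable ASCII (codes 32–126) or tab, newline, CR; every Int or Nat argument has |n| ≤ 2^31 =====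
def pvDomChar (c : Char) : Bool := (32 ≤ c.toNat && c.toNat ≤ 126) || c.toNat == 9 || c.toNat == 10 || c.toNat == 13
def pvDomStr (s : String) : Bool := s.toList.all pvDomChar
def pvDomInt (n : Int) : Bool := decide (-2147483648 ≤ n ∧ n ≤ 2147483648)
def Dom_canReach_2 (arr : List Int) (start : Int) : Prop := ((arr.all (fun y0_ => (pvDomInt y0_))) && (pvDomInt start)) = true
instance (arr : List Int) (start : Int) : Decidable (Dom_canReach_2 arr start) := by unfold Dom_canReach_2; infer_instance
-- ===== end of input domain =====

-- Jump Game III: A does a breadth-first search with an explicit queue; B saturates the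
-- reachable-index set level by level (frontier expansion to a fixpoint) and then checks
-- whether any reachable index holds a zero — same return value, no argument is mutated.

-- ===== PORT A =====
-- body of A's inner `for nxt in [...]` loop: conditionally enqueue and mark seen
def pushA (arr : List Int) (st : List Int × PySem.Set Int) (nxt : Int) : List Int × PySem.Set Int :=
  if 0 ≤ nxt ∧ nxt < (arr.length : Int) ∧ ¬ nxt ∈ st.2 then (st.1 ++ [nxt], PySem.Set.add st.2 nxt)
  else st

-- A's `while queue:` loop; fuel bounds the number of iterations (2*len(arr)+2 always suffices,
-- proved below: each iteration either shrinks the queue or grows `seen`, which is bounded)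
def bfsA (arr : List Int) : Nat → List Int → PySem.Set Int → Bool
  | 0, _, _ => false
  | fuel + 1, queue, seen =>
    match queue with
    | [] => false
    | curr :: rest =>
      match PySem.List.pyGet? arr curr with
      | none => false   -- Python raises IndexError here; excluded by Pre_
      | some v =>
        if v = 0 then true
        else
          let st := [curr + v, curr - v].foldl (pushA arr) (rest, seen)
          bfsA arr fuel st.1 st.2

def canReach_2 (arr : List Int) (start : Int) : Bool :=
  bfsA arr (2 * arr.length + 2) [start] (PySem.Set.ofList [start])

-- ===== PORT B =====
-- body of B's inner `for j in (i+v, i-v)` loop: collect unvisited in-range neighbours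
def pushB (arr : List Int) (reach nw : PySem.Set Int) (j : Int) : PySem.Set Int :=
  if 0 ≤ j ∧ j < (arr.length : Int) ∧ ¬ j ∈ reach then PySem.Set.add nw j else nw

-- body of B's `for i in frontier:` loop
def stepB (arr : List Int) (reach : PySem.Set Int) (nw : PySem.Set Int) (i : Int) : PySem.Set Int :=
  match PySem.List.pyGet? arr i with
  | none => nw    -- Python raises IndexError here; excluded by Pre_
  | some v => [i + v, i - v].foldl (pushB arr reach) nw

def newFrontier (arr : List Int) (reach : PySem.Set Int) (frontier : List Int) : PySem.Set Int :=
  frontier.foldl (stepB arr reach) PySem.Set.empty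

-- B's final `any(arr[i] == 0 for i in reach)`
def anyZero (arr : List Int) (reach : PySem.Set Int) : Bool :=
  reach.any (fun i => PySem.List.pyGet? arr i == some 0)

-- B's `while frontier:` loop; fuel bounds the number of rounds (len(arr)+2 always suffices,
-- proved below: every round with a nonempty frontier strictly grows `reach`, which is bounded)
def satB (arr : List Int) : Nat → PySem.Set Int → PySem.Set Int → Bool
  | 0, reach, _ => anyZero arr reach
  | fuel + 1, reach, frontier =>
    match frontier with
    | [] => anyZero arr reach
    | _ :: _ =>
      let nw := newFrontier arr reach frontier
      satB arr fuel (PySem.Set.union reach nw) nw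

def canReach_2_alt (arr : List Int) (start : Int) : Bool :=
  satB arr (arr.length + 2) (PySem.Set.ofList [start]) (PySem.Set.ofList [start])

-- ===== PRECONDITION & SPEC =====
-- Pre_ excludes exactly the inputs where Python's arr[start] raises IndexError
-- (empty arr, or start outside [-len(arr), len(arr))); both A and B raise there.
def Pre_canReach_2 (arr : List Int) (start : Int) : Prop :=
  PySem.Raise.InRange arr.length start
instance (arr : List Int) (start : Int) : Decidable (Pre_canReach_2 arr start) := by
  unfold Pre_canReach_2; infer_instance

def pvWitness_canReach_2 : List Int × Int := ([3, 1, 0, 4], 1)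

def Spec_canReach_2 (arr : List Int) (start : Int) (out : Bool) : Prop := out = canReach_2_alt arr start
instance (arr : List Int) (start : Int) (out : Bool) : Decidable (Spec_canReach_2 arr start out) := by unfold Spec_canReach_2; infer_instance

-- ===== CLAIM (what is proved, stated in full; the proofs are below) =====
def Claim_equal_canReach_2 : Prop := ∀ (arr : List Int) (start : Int), Dom_canReach_2 arr start → Pre_canReach_2 arr start → Spec_canReach_2 arr start (canReach_2 arr start)

-- ===== LEMMAS AND PROOFS =====

-- the jump graph: neighbours of index i (in-range targets i ± arr[i]; [] where arr[i] raises)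
def nbrs (arr : List Int) (i : Int) : List Int :=
  match PySem.List.pyGet? arr i with
  | none => []
  | some v => [i + v, i - v].filter (fun j => decide (0 ≤ j ∧ j < (arr.length : Int)))

def Reaches (arr : List Int) (start j : Int) : Prop :=
  Relation.ReflTransGen (fun a b => b ∈ nbrs arr a) start j

-- the common specification both searches are proved equivalent to
def HasZero (arr : List Int) (start : Int) : Prop :=
  ∃ j, Reaches arr start j ∧ PySem.List.pyGet? arr j = some 0

lemma mem_nbrs (arr : List Int) (i j : Int) :
    j ∈ nbrs arr i ↔ ∃ v, PySem.List.pyGet? arr i = some v ∧ (j = i + v ∨ j = i - v) ∧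
      0 ≤ j ∧ j < (arr.length : Int) := by
  unfold nbrs
  cases h : PySem.List.pyGet? arr i <;> simp [List.mem_filter]

lemma nbrs_inR (arr : List Int) (i j : Int) (h : j ∈ nbrs arr i) :
    0 ≤ j ∧ j < (arr.length : Int) := by
  rcases (mem_nbrs arr i j).1 h with ⟨v, _, _, h1, h2⟩; exact ⟨h1, h2⟩

lemma closure_subset (arr : List Int) (start : Int) (S : List Int)
    (h0 : start ∈ S) (hcl : ∀ x ∈ S, ∀ j ∈ nbrs arr x, j ∈ S) :
    ∀ j, Reaches arr start j → j ∈ S := by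
  intro j h
  induction h with
  | refl => exact h0
  | tail _ hbc ih => exact hcl _ ih _ hbc

-- a Nodup list of ints that are all `start` or in [0, n) has at most n+1 elements
lemma lenBound (n : Nat) (start : Int) (l : List Int) (hN : l.Nodup)
    (hb : ∀ x ∈ l, x = start ∨ (0 ≤ x ∧ x < (n : Int))) : l.length ≤ n + 1 := by
  have hsub : l.toFinset ⊆ insert start (Finset.image (fun k : Nat => (k : Int)) (Finset.range n)) := by
    intro x hx
    have hx' : x ∈ l := List.mem_toFinset.mp hx
    rcases hb x hx' with h | ⟨h0, h1⟩
    · exact Finset.mem_insert.mpr (Or.inl h)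
    · refine Finset.mem_insert.mpr (Or.inr ?_)
      exact Finset.mem_image.mpr ⟨x.toNat, Finset.mem_range.mpr (by omega), by omega⟩
  have h1 : l.toFinset.card ≤ (insert start (Finset.image (fun k : Nat => (k : Int)) (Finset.range n))).card :=
    Finset.card_le_card hsub
  have h2 : (insert start (Finset.image (fun k : Nat => (k : Int)) (Finset.range n))).card ≤
      (Finset.image (fun k : Nat => (k : Int)) (Finset.range n)).card + 1 := Finset.card_insert_le _ _
  have h3 : (Finset.image (fun k : Nat => (k : Int)) (Finset.range n)).card ≤ n := by
    calc (Finset.image (fun k : Nat => (k : Int)) (Finset.range n)).card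
        ≤ (Finset.range n).card := Finset.card_image_le
      _ = n := Finset.card_range n
  have h4 : l.toFinset.card = l.length := List.toFinset_card_of_nodup hN
  omega

-- one fresh element outside a sublist forces a strictly larger length
lemma len_lt (r u : List Int) (hu : u.Nodup) (hr : r.Nodup)
    (hsub : ∀ x ∈ r, x ∈ u) (y : Int) (hy : y ∈ u) (hyn : y ∉ r) :
    r.length + 1 ≤ u.length := by
  have hsub' : insert y r.toFinset ⊆ u.toFinset := by
    intro x hx
    rcases Finset.mem_insert.mp hx with h | h
    · exact List.mem_toFinset.mpr (h ▸ hy)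
    · exact List.mem_toFinset.mpr (hsub x (List.mem_toFinset.mp h))
  have hcard := Finset.card_le_card hsub'
  rw [Finset.card_insert_of_notMem (by simpa using hyn)] at hcard
  rw [List.toFinset_card_of_nodup hr, List.toFinset_card_of_nodup hu] at hcard
  omega

-- pyGet? is `some` on seen nodes (needed to dismiss the `none` branches)
lemma get_isSome_of_node (arr : List Int) (start x : Int)
    (hPre : PySem.Raise.InRange arr.length start)
    (hx : x = start ∨ (0 ≤ x ∧ x < (arr.length : Int))) :
    ∃ v, PySem.List.pyGet? arr x = some v := by
  cases hget : PySem.List.pyGet? arr x with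
  | some v => exact ⟨v, rfl⟩
  | none =>
    exfalso
    have h := (PySem.List.pyGet?_eq_none_iff arr x).mp hget
    rcases hx with h' | ⟨h0, h1⟩
    · exact h (h' ▸ hPre)
    · exact h (by simp [PySem.Raise.InRange]; omega)

-- ---- A side ----

structure InvA (arr : List Int) (start : Int) (queue seen : List Int) : Prop where
  sub : ∀ x ∈ queue, x ∈ seen
  nodupQ : queue.Nodup
  nodupS : seen.Nodup
  hreach : ∀ x ∈ seen, Reaches arr start x
  closed : ∀ x ∈ seen, x ∉ queue → (∀ j ∈ nbrs arr x, j ∈ seen) ∧ PySem.List.pyGet? arr x ≠ some 0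
  hstart : start ∈ seen
  bound : ∀ x ∈ seen, x = start ∨ (0 ≤ x ∧ x < (arr.length : Int))

-- invariant of A's inner fold, processing the pending candidate neighbours of curr
structure MidA (arr : List Int) (start curr : Int) (pending : List Int)
    (q s : List Int) (s0 r0 : Nat) : Prop where
  sub : ∀ x ∈ q, x ∈ s
  nodupQ : q.Nodup
  nodupS : s.Nodup
  hreach : ∀ x ∈ s, Reaches arr start x
  closed : ∀ x ∈ s, x ∉ q → x ≠ curr → (∀ j ∈ nbrs arr x, j ∈ s) ∧ PySem.List.pyGet? arr x ≠ some 0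
  currClosed : ∀ j ∈ nbrs arr curr, j ∈ s ∨ j ∈ pending
  currSeen : curr ∈ s
  currNotQ : curr ∉ q
  hstart : start ∈ s
  bound : ∀ x ∈ s, x = start ∨ (0 ≤ x ∧ x < (arr.length : Int))
  lenEq : s.length + r0 = q.length + s0
  s0le : s0 ≤ s.length

lemma midA_step (arr : List Int) (start curr v nxt : Int) (pending : List Int)
    (q s : List Int) (s0 r0 : Nat)
    (hget : PySem.List.pyGet? arr curr = some v)
    (hnxt : nxt = curr + v ∨ nxt = curr - v)
    (h : MidA arr start curr (nxt :: pending) q s s0 r0) :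
    MidA arr start curr pending (pushA arr (q, s) nxt).1 (pushA arr (q, s) nxt).2 s0 r0 := by
  obtain ⟨sub, nodupQ, nodupS, hreach, closed, currClosed, currSeen, currNotQ, hstart, bound, lenEq, s0le⟩ := h
  unfold pushA
  split_ifs with hc
  · obtain ⟨hc0, hc1, hcnin⟩ := hc
    have hnin : nxt ∉ s := hcnin
    have hadd : PySem.Set.add s nxt = s ++ [nxt] := PySem.Set.add_of_not_mem hnin
    have hstep : nxt ∈ nbrs arr curr := (mem_nbrs arr curr nxt).mpr ⟨v, hget, hnxt, hc0, hc1⟩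
    have hninq : nxt ∉ q := fun hx => hnin (sub nxt hx)
    simp only [hadd]
    refine ⟨?_, ?_, ?_, ?_, ?_, ?_, ?_, ?_, ?_, ?_, ?_, ?_⟩
    · intro x hx
      rcases List.mem_append.mp hx with hx | hx
      · exact List.mem_append.mpr (Or.inl (sub x hx))
      · exact List.mem_append.mpr (Or.inr hx)
    · exact List.Nodup.append nodupQ (List.nodup_singleton _)
        (fun a ha hb => by simp at hb; exact hninq (hb ▸ ha))
    · exact List.Nodup.append nodupS (List.nodup_singleton _)
        (fun a ha hb => by simp at hb; exact hnin (hb ▸ ha))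
    · intro x hx
      rcases List.mem_append.mp hx with hx | hx
      · exact hreach x hx
      · simp at hx; subst hx
        exact Relation.ReflTransGen.tail (hreach curr currSeen) hstep
    · intro x hx hxq hxc
      rcases List.mem_append.mp hx with hx | hx
      · have hxq' : x ∉ q := fun hq => hxq (List.mem_append.mpr (Or.inl hq))
        obtain ⟨hcl, hnz⟩ := closed x hx hxq' hxc
        exact ⟨fun j hj => List.mem_append.mpr (Or.inl (hcl j hj)), hnz⟩
      · simp at hx; subst hx
        exact absurd (List.mem_append.mpr (Or.inr (by simp))) hxq
    · intro j hj
      rcases currClosed j hj with hjs | hjp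
      · exact Or.inl (List.mem_append.mpr (Or.inl hjs))
      · rcases List.mem_cons.mp hjp with hje | hjp
        · exact Or.inl (List.mem_append.mpr (Or.inr (by simp [hje])))
        · exact Or.inr hjp
    · exact List.mem_append.mpr (Or.inl currSeen)
    · intro hx
      rcases List.mem_append.mp hx with hx | hx
      · exact currNotQ hx
      · simp at hx; exact hnin (hx ▸ currSeen)
    · exact List.mem_append.mpr (Or.inl hstart)
    · intro x hx
      rcases List.mem_append.mp hx with hx | hx
      · exact bound x hx
      · simp at hx; subst hx; exact Or.inr ⟨hc0, hc1⟩
    · simp only [List.length_append, List.length_singleton]; omega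
    · simp only [List.length_append, List.length_singleton]; omega
  · push Not at hc
    refine ⟨sub, nodupQ, nodupS, hreach, closed, ?_, currSeen, currNotQ, hstart, bound, lenEq, s0le⟩
    intro j hj
    rcases currClosed j hj with hjs | hjp
    · exact Or.inl hjs
    · rcases List.mem_cons.mp hjp with hje | hjp
      · subst hje
        obtain ⟨h0, h1⟩ := nbrs_inR arr curr j hj
        exact Or.inl (hc h0 h1)
      · exact Or.inr hjp

lemma midA_exit (arr : List Int) (start curr v : Int) (q s : List Int) (s0 r0 : Nat)
    (hget : PySem.List.pyGet? arr curr = some v) (hv : v ≠ 0)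
    (h : MidA arr start curr [] q s s0 r0) : InvA arr start q s := by
  refine ⟨h.sub, h.nodupQ, h.nodupS, h.hreach, ?_, h.hstart, h.bound⟩
  intro x hx hxq
  by_cases hxc : x = curr
  · subst hxc
    refine ⟨fun j hj => (h.currClosed j hj).resolve_right (by simp), ?_⟩
    rw [hget]; intro heq; exact hv (Option.some.inj heq)
  · exact h.closed x hx hxq hxc

lemma doneA (arr : List Int) (start : Int) (seen : List Int)
    (h : InvA arr start [] seen) : ¬ HasZero arr start := by
  rintro ⟨j, hr, h0⟩
  have hj : j ∈ seen :=
    closure_subset arr start seen h.hstart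
      (fun x hx => (h.closed x hx (by simp)).1) j hr
  exact (h.closed j hj (by simp)).2 h0

lemma bfsA_correct (arr : List Int) (start : Int)
    (hPre : PySem.Raise.InRange arr.length start) :
    ∀ fuel (queue seen : List Int), InvA arr start queue seen →
      2 * (arr.length + 1 - seen.length) + queue.length ≤ fuel →
      (bfsA arr fuel queue seen = true ↔ HasZero arr start) := by
  intro fuel
  induction fuel with
  | zero =>
    intro queue seen hInv hf
    have hq : queue = [] := List.eq_nil_of_length_eq_zero (by omega)
    subst hq
    simp only [bfsA]
    exact iff_of_false (by simp) (doneA arr start seen hInv)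
  | succ fuel ih =>
    intro queue seen hInv hf
    cases queue with
    | nil =>
      simp only [bfsA]
      exact iff_of_false (by simp) (doneA arr start seen hInv)
    | cons curr rest =>
      have hcurr_s : curr ∈ seen := hInv.sub curr (by simp)
      obtain ⟨v, hget⟩ := get_isSome_of_node arr start curr hPre (hInv.bound curr hcurr_s)
      simp only [bfsA, hget]
      by_cases hv : v = 0
      · subst hv
        rw [if_pos rfl]
        exact iff_of_true rfl ⟨curr, hInv.hreach curr hcurr_s, hget⟩
      · rw [if_neg hv]
        have hcnr : curr ∉ rest := (List.nodup_cons.mp hInv.nodupQ).1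
        have hmid0 : MidA arr start curr [curr + v, curr - v] rest seen seen.length rest.length := by
          refine ⟨fun x hx => hInv.sub x (by simp [hx]), (List.nodup_cons.mp hInv.nodupQ).2,
            hInv.nodupS, hInv.hreach, ?_, ?_, hcurr_s, hcnr, hInv.hstart, hInv.bound, by omega, le_refl _⟩
          · intro x hx hxr hxc
            exact hInv.closed x hx (by simp [hxc, hxr])
          · intro j hj
            rcases (mem_nbrs arr curr j).1 hj with ⟨v', hget', hj12, _, _⟩
            rw [hget] at hget'
            have : v' = v := (Option.some.inj hget').symm
            subst this
            rcases hj12 with h | h <;> simp [h]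
        have hmid1 := midA_step arr start curr v (curr + v) [curr - v] rest seen
          seen.length rest.length hget (Or.inl rfl) hmid0
        have hmid2 := midA_step arr start curr v (curr - v) [] _ _
          seen.length rest.length hget (Or.inr rfl) hmid1
        simp only [List.foldl]
        apply ih _ _ (midA_exit arr start curr v _ _ seen.length rest.length hget hv hmid2)
        have hlen := hmid2.lenEq
        have hs0 := hmid2.s0le
        simp only [Prod.mk.eta] at hlen hs0
        have hsb : (pushA arr (pushA arr (rest, seen) (curr + v)) (curr - v)).2.length ≤ arr.length + 1 :=
          lenBound arr.length start _ hmid2.nodupS hmid2.bound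
        simp only [List.length_cons] at hf
        simp only [Prod.mk.eta]
        omega

-- ---- B side ----

structure InvB (arr : List Int) (start : Int) (reach frontier : List Int) : Prop where
  sub : ∀ x ∈ frontier, x ∈ reach
  nodupR : reach.Nodup
  nodupF : frontier.Nodup
  hreach : ∀ x ∈ reach, Reaches arr start x
  closed : ∀ x ∈ reach, x ∉ frontier → ∀ j ∈ nbrs arr x, j ∈ reach
  hstart : start ∈ reach
  bound : ∀ x ∈ reach, x = start ∨ (0 ≤ x ∧ x < (arr.length : Int))

lemma pushB_one (arr : List Int) (reach acc : PySem.Set Int) (hN : acc.Nodup) (j : Int) :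
    (pushB arr reach acc j).Nodup ∧ (∀ x ∈ acc, x ∈ pushB arr reach acc j) ∧
    (∀ x ∈ pushB arr reach acc j, x ∈ acc ∨ (x = j ∧ j ∉ reach ∧ 0 ≤ j ∧ j < (arr.length : Int))) ∧
    (0 ≤ j ∧ j < (arr.length : Int) → j ∈ reach ∨ j ∈ pushB arr reach acc j) := by
  unfold pushB; split_ifs with h
  · refine ⟨PySem.Set.nodup_add _ j hN, ?_, ?_, ?_⟩
    · intro x hx; exact (PySem.Set.mem_add _ _ _).mpr (Or.inl hx)
    · intro x hx
      rcases (PySem.Set.mem_add _ _ _).mp hx with hx | hx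
      · exact Or.inl hx
      · exact Or.inr ⟨hx, h.2.2, h.1, h.2.1⟩
    · intro _; exact Or.inr ((PySem.Set.mem_add _ _ _).mpr (Or.inr rfl))
  · push Not at h
    refine ⟨hN, fun x hx => hx, fun x hx => Or.inl hx, ?_⟩
    intro ⟨h0, h1⟩
    by_cases hr : j ∈ reach
    · exact Or.inl hr
    · exact absurd (h h0 h1) (by simp [hr])

lemma pushB_spec (arr : List Int) (reach acc : PySem.Set Int) (hN : acc.Nodup) (i v : Int)
    (hget : PySem.List.pyGet? arr i = some v) :
    ([i + v, i - v].foldl (pushB arr reach) acc).Nodup ∧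
    (∀ j ∈ acc, j ∈ [i + v, i - v].foldl (pushB arr reach) acc) ∧
    (∀ j ∈ [i + v, i - v].foldl (pushB arr reach) acc,
        j ∈ acc ∨ (j ∉ reach ∧ j ∈ nbrs arr i)) ∧
    (∀ j ∈ nbrs arr i, j ∈ reach ∨ j ∈ [i + v, i - v].foldl (pushB arr reach) acc) := by
  simp only [List.foldl]
  obtain ⟨hN1, hup1, hsnd1, hcmp1⟩ := pushB_one arr reach acc hN (i + v)
  obtain ⟨hN2, hup2, hsnd2, hcmp2⟩ := pushB_one arr reach (pushB arr reach acc (i + v)) hN1 (i - v)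
  refine ⟨hN2, fun j hj => hup2 _ (hup1 _ hj), ?_, ?_⟩
  · intro j hj
    rcases hsnd2 j hj with hj1 | ⟨hje, hnr, h0, h1⟩
    · rcases hsnd1 j hj1 with hja | ⟨hje, hnr, h0, h1⟩
      · exact Or.inl hja
      · exact Or.inr ⟨hje ▸ hnr, (mem_nbrs arr i j).mpr ⟨v, hget, Or.inl hje, hje ▸ h0, hje ▸ h1⟩⟩
    · exact Or.inr ⟨hje ▸ hnr, (mem_nbrs arr i j).mpr ⟨v, hget, Or.inr hje, hje ▸ h0, hje ▸ h1⟩⟩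
  · intro j hj
    rcases (mem_nbrs arr i j).1 hj with ⟨v', hget', hj12, h0, h1⟩
    rw [hget] at hget'
    have hvv : v' = v := (Option.some.inj hget').symm
    subst hvv
    rcases hj12 with hje | hje
    · subst hje
      rcases hcmp1 ⟨h0, h1⟩ with h | h
      · exact Or.inl h
      · exact Or.inr (hup2 _ h)
    · subst hje
      rcases hcmp2 ⟨h0, h1⟩ with h | h
      · exact Or.inl h
      · exact Or.inr h

lemma nfAux (arr : List Int) (reach : PySem.Set Int) :
    ∀ (l : List Int) (acc : PySem.Set Int), acc.Nodup →
    (l.foldl (stepB arr reach) acc).Nodup ∧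
    (∀ j ∈ acc, j ∈ l.foldl (stepB arr reach) acc) ∧
    (∀ j ∈ l.foldl (stepB arr reach) acc,
        j ∈ acc ∨ (j ∉ reach ∧ ∃ i ∈ l, j ∈ nbrs arr i)) ∧
    (∀ i ∈ l, ∀ j ∈ nbrs arr i, j ∈ reach ∨ j ∈ l.foldl (stepB arr reach) acc) := by
  intro l
  induction l with
  | nil =>
    intro acc hN
    exact ⟨hN, fun j hj => hj, fun j hj => Or.inl hj, by simp⟩
  | cons i l ih =>
    intro acc hN
    simp only [List.foldl]
    cases hget : PySem.List.pyGet? arr i with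
    | none =>
      have hnil : nbrs arr i = [] := by unfold nbrs; rw [hget]
      have hstep : stepB arr reach acc i = acc := by unfold stepB; rw [hget]
      rw [hstep]
      obtain ⟨ihN, ihup, ihsnd, ihcmp⟩ := ih acc hN
      refine ⟨ihN, ihup, ?_, ?_⟩
      · intro j hj
        rcases ihsnd j hj with h | ⟨hnr, i', hi', hn⟩
        · exact Or.inl h
        · exact Or.inr ⟨hnr, i', by simp [hi'], hn⟩
      · intro i' hi' j hj
        rcases List.mem_cons.mp hi' with he | hm
        · subst he; rw [hnil] at hj; cases hj
        · exact ihcmp i' hm j hj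
    | some v =>
      have hstep : stepB arr reach acc i = [i + v, i - v].foldl (pushB arr reach) acc := by
        unfold stepB; rw [hget]
      rw [hstep]
      obtain ⟨pN, pup, psnd, pcmp⟩ := pushB_spec arr reach acc hN i v hget
      obtain ⟨ihN, ihup, ihsnd, ihcmp⟩ := ih _ pN
      refine ⟨ihN, fun j hj => ihup _ (pup _ hj), ?_, ?_⟩
      · intro j hj
        rcases ihsnd j hj with h | ⟨hnr, i', hi', hn⟩
        · rcases psnd j h with h' | ⟨hnr, hn⟩
          · exact Or.inl h'
          · exact Or.inr ⟨hnr, i, by simp, hn⟩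
        · exact Or.inr ⟨hnr, i', by simp [hi'], hn⟩
      · intro i' hi' j hj
        rcases List.mem_cons.mp hi' with he | hm
        · subst he
          rcases pcmp j hj with h | h
          · exact Or.inl h
          · exact Or.inr (ihup _ h)
        · exact ihcmp i' hm j hj

lemma newFrontier_spec (arr : List Int) (reach : PySem.Set Int) (frontier : List Int) :
    (newFrontier arr reach frontier).Nodup ∧
    (∀ j ∈ newFrontier arr reach frontier,
        j ∉ reach ∧ ∃ i ∈ frontier, j ∈ nbrs arr i) ∧
    (∀ i ∈ frontier, ∀ j ∈ nbrs arr i, j ∈ reach ∨ j ∈ newFrontier arr reach frontier) := by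
  obtain ⟨hN, _, hsnd, hcmp⟩ := nfAux arr reach frontier PySem.Set.empty List.nodup_nil
  refine ⟨hN, ?_, hcmp⟩
  intro j hj
  rcases hsnd j hj with h | h
  · cases h
  · exact h

lemma doneB (arr : List Int) (start : Int) (reach : List Int)
    (h : InvB arr start reach []) : (anyZero arr reach = true ↔ HasZero arr start) := by
  unfold anyZero
  rw [List.any_eq_true]
  constructor
  · rintro ⟨i, hi, he⟩
    exact ⟨i, h.hreach i hi, by simpa using he⟩
  · rintro ⟨j, hr, h0⟩
    have hj : j ∈ reach :=
      closure_subset arr start reach h.hstart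
        (fun x hx => h.closed x hx (by simp)) j hr
    exact ⟨j, hj, by simp [h0]⟩

lemma satB_correct (arr : List Int) (start : Int) :
    ∀ fuel (reach frontier : List Int), InvB arr start reach frontier →
      (frontier ≠ [] → arr.length + 1 - reach.length + 1 ≤ fuel) →
      (satB arr fuel reach frontier = true ↔ HasZero arr start) := by
  intro fuel
  induction fuel with
  | zero =>
    intro reach frontier hInv hf
    have hfe : frontier = [] := by
      by_contra h
      have := hf h
      omega
    subst hfe
    simp only [satB]
    exact doneB arr start reach hInv
  | succ fuel ih =>
    intro reach frontier hInv hf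
    cases frontier with
    | nil =>
      simp only [satB]
      exact doneB arr start reach hInv
    | cons x xs =>
      simp only [satB]
      obtain ⟨nfN, nfsnd, nfcmp⟩ := newFrontier_spec arr reach (x :: xs)
      have hInv' : InvB arr start (PySem.Set.union reach (newFrontier arr reach (x :: xs)))
          (newFrontier arr reach (x :: xs)) := by
        refine ⟨?_, ?_, nfN, ?_, ?_, ?_, ?_⟩
        · intro y hy; exact (PySem.Set.mem_union _ _ _).mpr (Or.inr hy)
        · exact PySem.Set.nodup_union _ _ hInv.nodupR
        · intro y hy
          rcases (PySem.Set.mem_union _ _ _).mp hy with h | h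
          · exact hInv.hreach y h
          · obtain ⟨_, i, hi, hn⟩ := nfsnd y h
            exact Relation.ReflTransGen.tail (hInv.hreach i (hInv.sub i hi)) hn
        · intro y hy hynf j hj
          have hyr : y ∈ reach := by
            rcases (PySem.Set.mem_union _ _ _).mp hy with h | h
            · exact h
            · exact absurd h hynf
          by_cases hyf : y ∈ x :: xs
          · rcases nfcmp y hyf j hj with h | h
            · exact (PySem.Set.mem_union _ _ _).mpr (Or.inl h)
            · exact (PySem.Set.mem_union _ _ _).mpr (Or.inr h)
          · exact (PySem.Set.mem_union _ _ _).mpr (Or.inl (hInv.closed y hyr hyf j hj))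
        · exact (PySem.Set.mem_union _ _ _).mpr (Or.inl hInv.hstart)
        · intro y hy
          rcases (PySem.Set.mem_union _ _ _).mp hy with h | h
          · exact hInv.bound y h
          · obtain ⟨_, i, hi, hn⟩ := nfsnd y h
            exact Or.inr (nbrs_inR arr i y hn)
      apply ih _ _ hInv'
      intro hne
      obtain ⟨y, hy⟩ := List.exists_mem_of_ne_nil _ hne
      have hynr : y ∉ reach := (nfsnd y hy).1
      have hyu : y ∈ PySem.Set.union reach (newFrontier arr reach (x :: xs)) :=
        (PySem.Set.mem_union _ _ _).mpr (Or.inr hy)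
      have hgrow := len_lt reach _ hInv'.nodupR hInv.nodupR
        (fun z hz => (PySem.Set.mem_union _ _ _).mpr (Or.inl hz)) y hyu hynr
      have hub : (PySem.Set.union reach (newFrontier arr reach (x :: xs))).length ≤ arr.length + 1 :=
        lenBound arr.length start _ hInv'.nodupR hInv'.bound
      have hmeas := hf (by simp)
      omega

-- ---- the two top levels ----

lemma ofList_singleton (x : Int) : PySem.Set.ofList [x] = [x] := rfl

lemma invA_init (arr : List Int) (start : Int) : InvA arr start [start] [start] := by
  refine ⟨fun x hx => hx, List.nodup_singleton _, List.nodup_singleton _, ?_, ?_, by simp, ?_⟩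
  · intro x hx
    have : x = start := by simpa using hx
    subst this; exact Relation.ReflTransGen.refl
  · intro x hx hnx; exact absurd hx hnx
  · intro x hx; exact Or.inl (by simpa using hx)

lemma invB_init (arr : List Int) (start : Int) : InvB arr start [start] [start] := by
  refine ⟨fun x hx => hx, List.nodup_singleton _, List.nodup_singleton _, ?_, ?_, by simp, ?_⟩
  · intro x hx
    have : x = start := by simpa using hx
    subst this; exact Relation.ReflTransGen.refl
  · intro x hx hnx; exact absurd hx hnx
  · intro x hx; exact Or.inl (by simpa using hx)

-- ===== VERDICT (by name: the statement is the Claim_ definition above) =====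
theorem canReach_2_spec : Claim_equal_canReach_2 := by
  intro arr start _ hPre
  unfold Spec_canReach_2
  have hA : canReach_2 arr start = true ↔ HasZero arr start := by
    unfold canReach_2
    rw [ofList_singleton]
    exact bfsA_correct arr start hPre (2 * arr.length + 2) [start] [start]
      (invA_init arr start) (by simp)
  have hB : canReach_2_alt arr start = true ↔ HasZero arr start := by
    unfold canReach_2_alt
    rw [ofList_singleton]
    exact satB_correct arr start (arr.length + 2) [start] [start]
      (invB_init arr start) (by intro _; simp)
  have h := hA.trans hB.symm
  cases h1 : canReach_2 arr start <;> cases h2 : canReach_2_alt arr start <;> simp_all
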